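-- pv_equiv track=rewrite | github.com/yyfsunnyboy/Mathproject_tvet_mathB | skills/jh_數學2上_SolvingQuadraticEquationsByCompletingTheSquare.py | _simplify_sqrt_value
-- ===== SOURCE A (Python) =====
-- def _simplify_sqrt_value(n):
--     """
--     Simplifies sqrt(n) into a*sqrt(b) form.
--     Returns (coefficient, radicand) where sqrt(n) = coefficient * sqrt(radicand).
--     e.g., _simplify_sqrt_value(8) -> (2, 2) for 2*sqrt(2)
--           _simplify_sqrt_value(12) -> (2, 3) for 2*sqrt(3)
--           _simplify_sqrt_value(5) -> (1, 5) for 1*sqrt(5)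
--     """
--     if n < 0:
--         raise ValueError("Cannot simplify sqrt of a negative number for real solutions.")
--     if n == 0:
--         return (0, 0)
--
--     coeff = 1
--     i = 2
--     while i * i <= n:
--         while n % (i * i) == 0:
--             coeff *= i
--             n //= (i * i)
--         i += 1
--     return (coeff, n)
-- ===== SOURCE B (Python) =====
-- def _simplify_sqrt_value(n):
--     """Simplify sqrt(n) to a*sqrt(b): scan k = 1..isqrt(n) once, keeping the
--     largest k whose square divides n; then the radicand is n // k**2."""
--     if n < 0:
--         raise ValueError("Cannot simplify sqrt of a negative number for real solutions.")
--     if n == 0: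
--         return (0, 0)
--     best = 1
--     k = 1
--     while k * k <= n:
--         if n % (k * k) == 0:
--             best = k
--         k += 1
--     return (best, n // (best * best))
-- ===== Notes on version B (the rewrite author's own statement) =====
-- stated objective: alternative
-- what changed: A strips square prime-power factors with two nested while-loops mutating coeff and n; B does a single ascending scan k=1..isqrt(n) recording the largest k with k*k | n and returns (k, n // k**2) -- a search for the largest square divisor instead of factor extraction.
import Mathlib
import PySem

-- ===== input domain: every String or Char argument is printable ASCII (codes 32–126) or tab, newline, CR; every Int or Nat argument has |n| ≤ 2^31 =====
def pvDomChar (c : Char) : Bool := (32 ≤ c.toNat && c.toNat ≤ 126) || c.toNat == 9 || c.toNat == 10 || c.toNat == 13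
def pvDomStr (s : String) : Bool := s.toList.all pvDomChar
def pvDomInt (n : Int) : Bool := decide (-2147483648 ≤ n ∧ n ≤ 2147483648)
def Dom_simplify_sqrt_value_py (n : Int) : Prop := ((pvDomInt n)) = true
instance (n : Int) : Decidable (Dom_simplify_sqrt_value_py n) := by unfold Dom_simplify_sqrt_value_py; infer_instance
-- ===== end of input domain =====

-- B replaces A's nested square-factor extraction by a single ascending scan for the
-- largest k with k*k | n (objective: alternative algorithm of the same cost).

-- ===== PORT A =====
-- termination lemma for pyInnerA, cited by name in its decreasing_by
theorem pyInnerA_dec (n i : Int) (hi : 2 ≤ i) (hn : 0 < n) :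
    (PySem.Int.floordiv n (i * i)).toNat < n.toNat := by
  have hii : (0:Int) < i * i := by nlinarith
  rw [PySem.Int.floordiv_eq_ediv_of_pos hii]
  have hq := Int.mul_ediv_add_emod n (i * i)
  have hr1 := Int.emod_nonneg n hii.ne'
  have hqn : n / (i * i) < n := by nlinarith [Int.ediv_nonneg hn.le hii.le]
  have := Int.ediv_nonneg hn.le hii.le
  omega

-- inner `while n % (i*i) == 0:` loop of A; the extra conjuncts 2 ≤ i ∧ 0 < n are
-- totality guards only (they hold at every state the Python loop reaches).
def pyInnerA (coeff n i : Int) : Int × Int :=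
  if h : 2 ≤ i ∧ 0 < n ∧ PySem.Int.mod n (i * i) = 0 then
    pyInnerA (coeff * i) (PySem.Int.floordiv n (i * i)) i
  else (coeff, n)
termination_by n.toNat
decreasing_by exact pyInnerA_dec n i h.1 h.2.1

-- the inner loop never increases n (cited by pyOuterA's termination proof)
theorem pyInnerA_snd_le (coeff n i : Int) : (pyInnerA coeff n i).2 ≤ n := by
  induction coeff, n using pyInnerA.induct i with
  | case1 coeff n h ih =>
    rw [pyInnerA, dif_pos h]
    have hii : (0:Int) < i * i := by nlinarith [h.1]
    have hle : PySem.Int.floordiv n (i * i) ≤ n := by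
      rw [PySem.Int.floordiv_eq_ediv_of_pos hii]
      exact Int.ediv_le_self _ h.2.1.le
    exact le_trans ih hle
  | case2 coeff n h =>
    rw [pyInnerA, dif_neg h]

-- termination lemma for pyOuterA, cited by name in its decreasing_by
theorem pyOuterA_dec (coeff n i : Int) (hi : 2 ≤ i) (hiin : i * i ≤ n) :
    ((pyInnerA coeff n i).2 + 1 - (i + 1)).toNat < (n + 1 - i).toNat := by
  have h1 := pyInnerA_snd_le coeff n i
  have hin : i ≤ n := by nlinarith
  omega

-- outer `while i*i <= n:` loop of A; 2 ≤ i is a totality guard only.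
def pyOuterA (coeff n i : Int) : Int × Int :=
  if h : 2 ≤ i ∧ i * i ≤ n then
    pyOuterA (pyInnerA coeff n i).1 (pyInnerA coeff n i).2 (i + 1)
  else (coeff, n)
termination_by (n + 1 - i).toNat
decreasing_by exact pyOuterA_dec coeff n i h.1 h.2

def simplify_sqrt_value_py (n : Int) : Int × Int :=
  if n < 0 then (0, 0)          -- Python raises ValueError here; excluded by Pre_
  else if n = 0 then (0, 0)
  else pyOuterA 1 n 2

-- ===== PORT B =====
-- termination lemma for pyScanB, cited by name in its decreasing_by
theorem pyScanB_dec (k n : Int) (hk : 1 ≤ k) (hkn : k * k ≤ n) :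
    (n + 1 - (k + 1)).toNat < (n + 1 - k).toNat := by
  have hn : k ≤ n := by nlinarith
  omega

-- B's single `while k*k <= n:` scan; 1 ≤ k is a totality guard only.
def pyScanB (best k n : Int) : Int :=
  if h : 1 ≤ k ∧ k * k ≤ n then
    pyScanB (if PySem.Int.mod n (k * k) = 0 then k else best) (k + 1) n
  else best
termination_by (n + 1 - k).toNat
decreasing_by exact pyScanB_dec k n h.1 h.2

def simplify_sqrt_value_py_alt (n : Int) : Int × Int :=
  if n < 0 then (0, 0)          -- Python raises ValueError here; excluded by Pre_
  else if n = 0 then (0, 0)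
  else (pyScanB 1 1 n, PySem.Int.floordiv n (pyScanB 1 1 n * pyScanB 1 1 n))

-- ===== PRECONDITION & SPEC =====
-- A raises ValueError exactly on negative n; Pre_ excludes exactly those inputs.
def Pre_simplify_sqrt_value_py (n : Int) : Prop := 0 ≤ n
instance (n : Int) : Decidable (Pre_simplify_sqrt_value_py n) := by
  unfold Pre_simplify_sqrt_value_py; infer_instance

def pvWitness_simplify_sqrt_value_py : Int := 12

def Spec_simplify_sqrt_value_py (n : Int) (out : Int × Int) : Prop := out = simplify_sqrt_value_py_alt n
instance (n : Int) (out : Int × Int) : Decidable (Spec_simplify_sqrt_value_py n out) := by unfold Spec_simplify_sqrt_value_py; infer_instance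

-- ===== CLAIM (what is proved, stated in full; the proofs are below) =====
def Claim_equal_simplify_sqrt_value_py : Prop := ∀ (n : Int), Dom_simplify_sqrt_value_py n → Pre_simplify_sqrt_value_py n → Spec_simplify_sqrt_value_py n (simplify_sqrt_value_py n)

-- ===== LEMMAS AND PROOFS =====

-- Nat form of the key uniqueness fact: k² ∣ c²·r with r squarefree forces k ∣ c.
theorem nat_sq_dvd_sq_mul_squarefree {k c r : ℕ} (hc : c ≠ 0) (hr : r ≠ 0)
    (hsf : Squarefree r) (h : k * k ∣ c * c * r) : k ∣ c := by
  have hk : k ≠ 0 := by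
    rintro rfl
    simp only [Nat.zero_mul, zero_dvd_iff] at h
    exact (by positivity : 0 < c * c * r).ne' h
  have hccr : c * c * r ≠ 0 := by positivity
  have hfle := (Nat.factorization_le_iff_dvd (Nat.mul_ne_zero hk hk) hccr).mpr h
  refine (Nat.factorization_le_iff_dvd hk hc).mp ?_
  intro p
  have h1 := hfle p
  rw [Nat.factorization_mul hk hk,
      Nat.factorization_mul (Nat.mul_ne_zero hc hc) hr,
      Nat.factorization_mul hc hc] at h1
  have h2 : r.factorization p ≤ 1 := hsf.natFactorization_le_one p
  simp only [Finsupp.add_apply] at h1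
  omega

-- Int form used at the top level.
theorem int_sq_dvd_dvd {k c r : Int} (hc : 0 < c) (hr : 0 < r)
    (hsf : ∀ j : Int, 2 ≤ j → ¬ j * j ∣ r) (h : k * k ∣ c * c * r) : k ∣ c := by
  have hsfN : Squarefree r.natAbs := by
    rw [Nat.squarefree_iff_prime_squarefree]
    intro p hp hd
    refine hsf (p : Int) (by exact_mod_cast hp.two_le) ?_
    have h2 : ((p * p : ℕ) : Int) ∣ (r.natAbs : Int) := Int.natCast_dvd_natCast.mpr hd
    rwa [Int.natAbs_of_nonneg hr.le, Nat.cast_mul] at h2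
  have hN : k.natAbs * k.natAbs ∣ c.natAbs * c.natAbs * r.natAbs := by
    have h3 := Int.natAbs_dvd_natAbs.mpr h
    rwa [Int.natAbs_mul, Int.natAbs_mul, Int.natAbs_mul] at h3
  exact Int.natAbs_dvd_natAbs.mp
    (nat_sq_dvd_sq_mul_squarefree (by simpa using hc.ne') (by simpa using hr.ne') hsfN hN)

-- Specification of A's inner loop.
theorem pyInnerA_spec (coeff n i : Int) (hi : 2 ≤ i) (hn : 0 < n) (hc : 0 < coeff) :
    (pyInnerA coeff n i).1 * (pyInnerA coeff n i).1 * (pyInnerA coeff n i).2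
        = coeff * coeff * n
    ∧ 0 < (pyInnerA coeff n i).2 ∧ 0 < (pyInnerA coeff n i).1
    ∧ (pyInnerA coeff n i).2 ∣ n ∧ ¬ (i * i ∣ (pyInnerA coeff n i).2) := by
  revert hn hc
  induction coeff, n using pyInnerA.induct i with
  | case1 coeff n h ih =>
    intro hn hc
    have hii : (0:Int) < i * i := by nlinarith
    have hdvd : i * i ∣ n := (PySem.Int.mod_eq_zero_iff_dvd n (i * i)).mp h.2.2
    have hqe : i * i * PySem.Int.floordiv n (i * i) = n := by
      rw [PySem.Int.floordiv_eq_ediv_of_pos hii]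
      exact Int.mul_ediv_cancel' hdvd
    have hqpos : 0 < PySem.Int.floordiv n (i * i) := by
      rcases lt_or_ge 0 (PySem.Int.floordiv n (i * i)) with hq | hq
      · exact hq
      · nlinarith
    have hrec := ih hqpos (by nlinarith)
    rw [pyInnerA, dif_pos h]
    have hqe2 := hqe
    rw [mul_comm] at hqe2
    refine ⟨?_, hrec.2.1, hrec.2.2.1, ?_, hrec.2.2.2.2⟩
    · rw [hrec.1]; linear_combination coeff * coeff * hqe
    · exact dvd_trans hrec.2.2.2.1 ⟨i * i, hqe2.symm⟩
  | case2 coeff n h =>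
    intro hn hc
    rw [pyInnerA, dif_neg h]
    have hmod : PySem.Int.mod n (i * i) ≠ 0 := fun hm => h ⟨hi, hn, hm⟩
    exact ⟨rfl, hn, hc, dvd_refl n,
      fun hd => hmod ((PySem.Int.mod_eq_zero_iff_dvd n (i * i)).mpr hd)⟩

-- Specification of A's outer loop: the result (c, r) satisfies c²·r = coeff²·n and r
-- admits no square divisor j² with j ≥ 2.
theorem pyOuterA_spec (coeff n i : Int) (hi : 2 ≤ i) (hn : 0 < n) (hc : 0 < coeff)
    (hpast : ∀ j : Int, 2 ≤ j → j < i → ¬ j * j ∣ n) :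
    (pyOuterA coeff n i).1 * (pyOuterA coeff n i).1 * (pyOuterA coeff n i).2
        = coeff * coeff * n
    ∧ 0 < (pyOuterA coeff n i).1 ∧ 0 < (pyOuterA coeff n i).2
    ∧ ∀ j : Int, 2 ≤ j → ¬ j * j ∣ (pyOuterA coeff n i).2 := by
  revert hi hn hc hpast
  induction coeff, n, i using pyOuterA.induct with
  | case1 coeff n i h ih =>
    intro hi hn hc hpast
    have hinner := pyInnerA_spec coeff n i h.1 hn hc
    have hpast' : ∀ j : Int, 2 ≤ j → j < i + 1 → ¬ j * j ∣ (pyInnerA coeff n i).2 := by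
      intro j hj2 hji hd
      rcases lt_or_ge j i with hlt | hge
      · exact hpast j hj2 hlt (dvd_trans hd hinner.2.2.2.1)
      · have hji2 : j = i := by omega
        exact hinner.2.2.2.2 (hji2 ▸ hd)
    have hrec := ih (by omega) hinner.2.1 hinner.2.2.1 hpast'
    rw [pyOuterA, dif_pos h]
    exact ⟨by rw [hrec.1, hinner.1], hrec.2.1, hrec.2.2.1, hrec.2.2.2⟩
  | case2 coeff n i h =>
    intro hi hn hc hpast
    rw [pyOuterA, dif_neg h]
    have hni : n < i * i := by
      rcases not_and_or.mp h with h1 | h2 <;> omega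
    refine ⟨rfl, hc, hn, fun j hj2 hd => ?_⟩
    rcases lt_or_ge j i with hlt | hge
    · exact hpast j hj2 hlt hd
    · have hjn : j * j ≤ n := Int.le_of_dvd hn hd
      nlinarith

-- Specification of B's scan: starting from a valid best ≤ k it returns the largest
-- j with j² ∣ n among {best} ∪ [k, √n].
theorem pyScanB_spec (best k n : Int) (hb : 1 ≤ best) (hbk : best ≤ k) (hn : 0 < n)
    (hbd : best * best ∣ n) :
    1 ≤ pyScanB best k n ∧ pyScanB best k n * pyScanB best k n ∣ n
    ∧ best ≤ pyScanB best k n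
    ∧ ∀ j : Int, k ≤ j → j * j ∣ n → j ≤ pyScanB best k n := by
  revert hb hbk hbd
  induction best, k using pyScanB.induct n with
  | case1 best k h ih =>
    intro hb hbk hbd
    rw [pyScanB, dif_pos h]
    by_cases hm : PySem.Int.mod n (k * k) = 0
    · have hkd : k * k ∣ n := (PySem.Int.mod_eq_zero_iff_dvd n (k * k)).mp hm
      rw [dif_pos hm] at ih
      rw [if_pos hm]
      have hrec := ih h.1 (by omega) hkd
      refine ⟨hrec.1, hrec.2.1, le_trans hbk hrec.2.2.1, fun j hj hjd => ?_⟩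
      rcases lt_or_ge j (k + 1) with hlt | hge
      · have : j = k := by omega
        exact this ▸ hrec.2.2.1
      · exact hrec.2.2.2 j hge hjd
    · rw [dif_neg hm] at ih
      rw [if_neg hm]
      have hrec := ih hb (by omega) hbd
      refine ⟨hrec.1, hrec.2.1, hrec.2.2.1, fun j hj hjd => ?_⟩
      rcases lt_or_ge j (k + 1) with hlt | hge
      · exfalso
        have hje : j = k := by omega
        exact hm ((PySem.Int.mod_eq_zero_iff_dvd n (k * k)).mpr (hje ▸ hjd))
      · exact hrec.2.2.2 j hge hjd
  | case2 best k h =>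
    intro hb hbk hbd
    rw [pyScanB, dif_neg h]
    refine ⟨hb, hbd, le_refl _, fun j hj hjd => ?_⟩
    have hkn : ¬ (k * k ≤ n) := by
      rcases not_and_or.mp h with h1 | h2
      · omega
      · exact h2
    have hjn : j * j ≤ n := Int.le_of_dvd hn hjd
    nlinarith

-- ===== VERDICT (by name: the statement is the Claim_ definition above) =====
theorem simplify_sqrt_value_py_spec : Claim_equal_simplify_sqrt_value_py := by
  intro n _ hpre
  unfold Spec_simplify_sqrt_value_py simplify_sqrt_value_py simplify_sqrt_value_py_alt
  unfold Pre_simplify_sqrt_value_py at hpre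
  rcases eq_or_lt_of_le hpre with h0 | hpos
  · simp [← h0]
  · rw [if_neg (by omega), if_neg (by omega), if_neg (by omega), if_neg (by omega)]
    have hA := pyOuterA_spec 1 n 2 (by norm_num) hpos (by norm_num)
      (by intro j hj hji hd; omega)
    have hB := pyScanB_spec 1 1 n (by norm_num) (by norm_num) hpos (by norm_num)
    set c := (pyOuterA 1 n 2).1 with hc_def
    set r := (pyOuterA 1 n 2).2 with hr_def
    set b := pyScanB 1 1 n with hb_def
    have hcrn : c * c * r = n := by simpa using hA.1
    have hcb : c ≤ b := hB.2.2.2 c (by linarith [hA.2.1]) ⟨r, hcrn.symm⟩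
    have hbc : b ≤ c := Int.le_of_dvd hA.2.1
      (int_sq_dvd_dvd hA.2.1 hA.2.2.1 hA.2.2.2 (by rw [hcrn]; exact hB.2.1))
    have hbceq : b = c := le_antisymm hbc hcb
    have hdivq : PySem.Int.floordiv n (b * b) = r := by
      rw [hbceq, PySem.Int.floordiv_eq_ediv_of_pos (by nlinarith [hA.2.1]), ← hcrn]
      exact Int.mul_ediv_cancel_left r (by nlinarith [hA.2.1])
    rw [hbceq] at hdivq
    rw [← Prod.mk.eta (p := pyOuterA 1 n 2), ← hc_def, ← hr_def, hbceq, hdivq]
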